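-- pv_equiv track=rewrite | github.com/DGTV11/LCCL-PS-1-to-PS-8 | PS 8/ex183a.py | ret_search
-- ===== SOURCE A (Python) =====
-- def search(element_names: list[str], element_name_buckets: dict[str, list[str]]) -> list[str]:
--     avail_bucket = element_name_buckets.get(element_names[-1][-1].upper(), None)
--
--     if not avail_bucket:
--         return element_names
--
--     longest_name_list: list[str] = []
--     for name in avail_bucket:
--         if name in element_names:
--             continue
--         possible_longest_name_list = search(element_names + [name], element_name_buckets)
--         if len(possible_longest_name_list) > len(longest_name_list):
--             longest_name_list = possible_longest_name_list
--
--     return longest_name_list or element_names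
--
-- def ret_search(start_name: str, element_name_buckets: dict[str, list[str]]) -> tuple[str|None, str|None]: # (error, output)
--     for bucket_view in element_name_buckets.values():
--         if start_name in bucket_view:
--             break
--     else:
--         return f'{start_name} is an invalid element name', None
--
--     longest_list = search([start_name], element_name_buckets)
--
--     return None, f'The longest list that starts from {start_name} is ' + ', '.join(longest_list)
-- ===== SOURCE B (Python) =====
-- def ret_search(start_name, element_name_buckets):
--     # B: iterative explicit-stack DFS (preorder, first-wins strict max) instead of A's recursion
--     if not any(start_name in bucket for bucket in element_name_buckets.values()):
--         return f'{start_name} is an invalid element name', None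
--     stack = [[start_name]]
--     best = []
--     while stack:
--         path = stack.pop()
--         bucket = element_name_buckets.get(path[-1][-1].upper()) or []
--         ext = [name for name in bucket if name not in path]
--         if not ext:
--             if len(path) > len(best):
--                 best = path
--         else:
--             for name in reversed(ext):
--                 stack.append(path + [name])
--     return None, f'The longest list that starts from {start_name} is ' + ', '.join(best)
-- ===== Notes on version B (the rewrite author's own statement) =====
-- stated objective: alternative
-- what changed: A's recursive DFS (each level recomputes and compares its children's results with a local strict-max) is replaced by an iterative explicit-stack preorder DFS that threads one global best accumulator, updated only at dead-end paths; no recursion remains.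
import Mathlib
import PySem

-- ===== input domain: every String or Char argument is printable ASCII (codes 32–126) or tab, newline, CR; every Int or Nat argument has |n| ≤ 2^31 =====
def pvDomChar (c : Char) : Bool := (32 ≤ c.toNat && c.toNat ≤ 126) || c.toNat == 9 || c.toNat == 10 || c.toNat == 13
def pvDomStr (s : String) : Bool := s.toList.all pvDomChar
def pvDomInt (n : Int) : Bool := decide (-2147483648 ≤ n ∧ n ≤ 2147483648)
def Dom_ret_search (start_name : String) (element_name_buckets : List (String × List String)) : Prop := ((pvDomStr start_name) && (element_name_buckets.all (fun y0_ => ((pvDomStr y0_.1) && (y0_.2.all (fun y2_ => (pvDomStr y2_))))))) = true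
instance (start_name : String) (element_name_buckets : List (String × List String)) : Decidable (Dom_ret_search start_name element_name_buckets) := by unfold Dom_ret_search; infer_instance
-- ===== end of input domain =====

-- B replaces A's recursive DFS by an iterative explicit-stack DFS with one global best accumulator (alternative decomposition, same return value).
-- On inputs excluded by Pre_ret_search the Python A can raise IndexError (''[-1]); both ports return values there but nothing is claimed.


-- ===== PORT A =====
-- shared transliteration of the expression `…[-1][-1].upper()` (textually identical in both Pythons);
-- `none` marks exactly where Python raises IndexError (excluded by Pre_ret_search)
def pvLastKey? (names : List String) : Option String :=
  match PySem.List.pyGet? names (-1) with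
  | none => none
  | some s =>
    match PySem.Str.pyGet? s (-1) with
    | none => none
    | some c => some (String.ofList [PySem.Chars.upperChar c])

-- termination measure helpers for both ports (not part of the computation)
def pvAllNames (d : PySem.Dict String (List String)) : List String := d.values.flatten.dedup

def pvMu (d : PySem.Dict String (List String)) (names : List String) : Nat :=
  ((pvAllNames d).filter (fun x => decide (x ∉ names))).length

theorem pvMu_lt (d : PySem.Dict String (List String)) {names : List String} {n : String}
    (hmem : n ∈ pvAllNames d) (hnot : n ∉ names) :
    pvMu d (names ++ [n]) < pvMu d names := by
  unfold pvMu
  have hsub : List.Sublist ((pvAllNames d).filter (fun x => decide (x ∉ names ++ [n])))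
      ((pvAllNames d).filter (fun x => decide (x ∉ names))) := by
    apply List.monotone_filter_right
    intro a ha
    simp only [decide_eq_true_eq] at ha ⊢
    intro hc
    exact ha (List.mem_append_left _ hc)
  have hlen := hsub.length_le
  rcases lt_or_eq_of_le hlen with h | h
  · exact h
  · exfalso
    have heq := hsub.eq_of_length h
    have h1 : n ∈ (pvAllNames d).filter (fun x => decide (x ∉ names)) := by
      simp [List.mem_filter, hmem, hnot]
    rw [← heq] at h1
    simp [List.mem_filter] at h1

theorem pv_mem_values (d : PySem.Dict String (List String)) {key : String} {bucket : List String}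
    (h : d.get? key = some bucket) : bucket ∈ d.values := by
  have hit := PySem.Dict.mem_items_of_get?_eq_some d h
  simp only [PySem.Dict.values]
  exact List.mem_map.2 ⟨(key, bucket), hit, rfl⟩

theorem pv_mem_allNames (d : PySem.Dict String (List String)) {key : String} {bucket : List String} {n : String}
    (h : d.get? key = some bucket) (hn : n ∈ bucket) : n ∈ pvAllNames d := by
  unfold pvAllNames
  exact List.mem_dedup.2 (List.mem_flatten.2 ⟨bucket, pv_mem_values d h, hn⟩)

-- port of A's recursive `search`
def searchA (d : PySem.Dict String (List String)) (names : List String) : List String :=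
  match pvLastKey? names with
  | none => names              -- Python raises IndexError here; excluded by Pre_ret_search
  | some key =>
    match h : d.get? key with
    | none => names            -- avail_bucket is None: falsy
    | some bucket =>
      if bucket = [] then names   -- avail_bucket is []: falsy
      else
        let longest := bucket.attach.foldl
          (fun acc t =>
            if _h2 : t.1 ∈ names then acc
            else
              let r := searchA d (names ++ [t.1])
              if r.length > acc.length then r else acc) []
        if longest = [] then names else longest
termination_by pvMu d names
decreasing_by
  exact pvMu_lt d (pv_mem_allNames d h t.2) _h2

def ret_search (start_name : String) (element_name_buckets : List (String × List String)) : Option String × Option String :=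
  let d := PySem.Dict.ofList element_name_buckets
  if d.values.any (fun bucket_view => decide (start_name ∈ bucket_view)) then
    (none, some ("The longest list that starts from " ++ start_name ++ " is "
      ++ PySem.Str.join ", " (searchA d [start_name])))
  else
    (some (start_name ++ " is an invalid element name"), none)

-- ===== PORT B =====
-- `element_name_buckets.get(path[-1][-1].upper()) or []`
def pvBucketOf (d : PySem.Dict String (List String)) (path : List String) : List String :=
  match pvLastKey? path with
  | none => []                 -- Python raises IndexError here; excluded by Pre_ret_search
  | some key => (d.get? key).getD []

-- `[name for name in bucket if name not in path]`
def pvExt (d : PySem.Dict String (List String)) (path : List String) : List String :=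
  (pvBucketOf d path).filter (fun n => decide (n ∉ path))

-- stack measure: Σ over the stack of (C+1)^(μ path), C = total number of names in the buckets
def pvC (d : PySem.Dict String (List String)) : Nat := d.values.flatten.length

def pvWeight (d : PySem.Dict String (List String)) (p : List String) : Nat := (pvC d + 1) ^ pvMu d p

def pvM (d : PySem.Dict String (List String)) (stack : List (List String)) : Nat :=
  (stack.map (pvWeight d)).sum

theorem pvM_pop (d : PySem.Dict String (List String)) (path : List String) (rest : List (List String)) :
    pvM d rest < pvM d (path :: rest) := by
  unfold pvM
  simp only [List.map_cons, List.sum_cons]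
  have : 0 < pvWeight d path := Nat.pow_pos (by omega)
  omega

theorem pv_ext_mu_lt (d : PySem.Dict String (List String)) {path : List String} {n : String}
    (hn : n ∈ pvExt d path) : pvMu d (path ++ [n]) < pvMu d path := by
  have hnB : n ∈ pvBucketOf d path := List.mem_of_mem_filter hn
  have hnot : n ∉ path := by
    have := List.of_mem_filter hn
    simpa using this
  have hmem : n ∈ pvAllNames d := by
    unfold pvBucketOf at hnB
    rcases hk : pvLastKey? path with _ | key <;> rw [hk] at hnB
    · simp at hnB
    · have hnB' : n ∈ (d.get? key).getD [] := hnB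
      rcases hg : d.get? key with _ | bucket <;> rw [hg] at hnB'
      · simp at hnB'
      · exact pv_mem_allNames d hg hnB'
  exact pvMu_lt d hmem hnot

theorem pv_bucket_len_le (d : PySem.Dict String (List String)) (path : List String) :
    (pvBucketOf d path).length ≤ pvC d := by
  unfold pvBucketOf pvC
  rcases pvLastKey? path with _ | key
  · simp
  · show ((d.get? key).getD []).length ≤ _
    rcases hg : d.get? key with _ | bucket
    · simp
    · simp only [Option.getD_some]
      have hv : bucket ∈ d.values := pv_mem_values d hg
      rw [List.length_flatten]
      exact List.le_sum_of_mem (List.mem_map_of_mem hv)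

theorem pvM_push (d : PySem.Dict String (List String)) (path : List String) (rest : List (List String))
    (hext : pvExt d path ≠ []) :
    pvM d ((pvExt d path).map (fun n => path ++ [n]) ++ rest) < pvM d (path :: rest) := by
  have hlt : ∀ n ∈ pvExt d path, pvMu d (path ++ [n]) < pvMu d path := fun n hn => pv_ext_mu_lt d hn
  obtain ⟨n0, hn0⟩ := List.exists_mem_of_ne_nil _ hext
  have hmu_pos : 1 ≤ pvMu d path := by have := hlt n0 hn0; omega
  have hsum : (((pvExt d path).map (fun n => path ++ [n])).map (pvWeight d)).sum
      ≤ (pvExt d path).length * (pvC d + 1) ^ (pvMu d path - 1) := by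
    have hb : ∀ x ∈ ((pvExt d path).map (fun n => path ++ [n])).map (pvWeight d),
        x ≤ (pvC d + 1) ^ (pvMu d path - 1) := by
      intro x hx
      simp only [List.mem_map] at hx
      obtain ⟨y, ⟨n, hn, rfl⟩, rfl⟩ := hx
      unfold pvWeight
      exact Nat.pow_le_pow_right (by omega) (by have := hlt n hn; omega)
    have := List.sum_le_card_nsmul _ _ hb
    simpa [List.length_map, smul_eq_mul] using this
  have hlen : (pvExt d path).length ≤ pvC d :=
    le_trans (List.length_filter_le _ _) (pv_bucket_len_le d path)
  have hpow : (pvExt d path).length * (pvC d + 1) ^ (pvMu d path - 1) < pvWeight d path := by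
    have h1 : (0:Nat) < (pvC d + 1) ^ (pvMu d path - 1) := Nat.pow_pos (by omega)
    have hstep : (pvExt d path).length * (pvC d + 1) ^ (pvMu d path - 1)
        < (pvC d + 1) * (pvC d + 1) ^ (pvMu d path - 1) := by nlinarith
    have hexp : (pvC d + 1) ^ pvMu d path = (pvC d + 1) * (pvC d + 1) ^ (pvMu d path - 1) := by
      conv_lhs => rw [show pvMu d path = (pvMu d path - 1) + 1 from by omega]
      rw [pow_succ']
    unfold pvWeight
    rw [hexp]
    exact hstep
  have hfinal : (((pvExt d path).map (fun n => path ++ [n])).map (pvWeight d)).sum < pvWeight d path :=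
    lt_of_le_of_lt hsum hpow
  unfold pvM
  rw [List.map_append, List.sum_append]
  simp only [List.map_cons, List.sum_cons]
  omega

-- port of B's `while stack:` loop (stack head = top of stack; pushing `reversed(ext)` means
-- the new stack is `ext.map … ++ rest`)
def loopB (d : PySem.Dict String (List String)) (stack : List (List String)) (best : List String) : List String :=
  match stack with
  | [] => best
  | path :: rest =>
    if h : pvExt d path = [] then
      loopB d rest (if best.length < path.length then path else best)
    else
      loopB d ((pvExt d path).map (fun n => path ++ [n]) ++ rest) best
termination_by pvM d stack
decreasing_by
  · exact pvM_pop d path rest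
  · exact pvM_push d path rest h

def ret_search_alt (start_name : String) (element_name_buckets : List (String × List String)) : Option String × Option String :=
  let d := PySem.Dict.ofList element_name_buckets
  if d.values.any (fun bucket => decide (start_name ∈ bucket)) then
    (none, some ("The longest list that starts from " ++ start_name ++ " is "
      ++ PySem.Str.join ", " (loopB d [[start_name]] [])))
  else
    (some (start_name ++ " is an invalid element name"), none)

-- ===== PRECONDITION & SPEC =====
-- Pre_ excludes the inputs on which Python A raises IndexError (''[-1]): when start_name occurs in
-- some bucket (so the search runs at all), no bucket may contain the empty string.
def Pre_ret_search (start_name : String) (element_name_buckets : List (String × List String)) : Prop :=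
  (∃ p ∈ element_name_buckets, start_name ∈ p.2) → (∀ p ∈ element_name_buckets, "" ∉ p.2)
instance (start_name : String) (element_name_buckets : List (String × List String)) : Decidable (Pre_ret_search start_name element_name_buckets) := by unfold Pre_ret_search; infer_instance

def pvWitness_ret_search : String × (List (String × List String)) :=
  ("ab", [("B", ["ab", "ba"]), ("A", ["ba", "ab"])])

def Spec_ret_search (start_name : String) (element_name_buckets : List (String × List String)) (out : Option String × Option String) : Prop := out = ret_search_alt start_name element_name_buckets
instance (start_name : String) (element_name_buckets : List (String × List String)) (out : Option String × Option String) : Decidable (Spec_ret_search start_name element_name_buckets out) := by unfold Spec_ret_search; infer_instance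

-- ===== CLAIM (what is proved, stated in full; the proofs are below) =====
def Claim_equal_ret_search : Prop := ∀ (start_name : String) (element_name_buckets : List (String × List String)), Dom_ret_search start_name element_name_buckets → Pre_ret_search start_name element_name_buckets → Spec_ret_search start_name element_name_buckets (ret_search start_name element_name_buckets)

-- ===== LEMMAS AND PROOFS =====

-- the first-wins strict-max selector both Pythons use
def pvSel (a r : List String) : List String := if a.length < r.length then r else a

theorem pvSel_nil_left (r : List String) : pvSel [] r = r := by
  cases r <;> simp [pvSel]

theorem pvSel_nil_right (b : List String) : pvSel b [] = b := by
  simp [pvSel]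

theorem pvSel_assoc (a b c : List String) : pvSel (pvSel a b) c = pvSel a (pvSel b c) := by
  unfold pvSel
  split_ifs <;> first | rfl | omega

theorem pv_foldl_sel_eq (rs : List (List String)) (b : List String) :
    rs.foldl pvSel b = pvSel b (rs.foldl pvSel []) := by
  induction rs generalizing b with
  | nil => simp [pvSel_nil_right]
  | cons r rs ih =>
    simp only [List.foldl_cons]
    rw [ih (pvSel b r), ih (pvSel [] r), pvSel_nil_left, pvSel_assoc]

theorem pvSel_len (a r : List String) : a.length ≤ (pvSel a r).length := by
  unfold pvSel; split_ifs <;> omega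

theorem pv_foldl_sel_len (rs : List (List String)) (a : List String) :
    a.length ≤ (rs.foldl pvSel a).length := by
  induction rs generalizing a with
  | nil => simp
  | cons r rs ih => exact le_trans (pvSel_len a r) (ih (pvSel a r))

theorem searchA_ne_nil (d : PySem.Dict String (List String)) {names : List String}
    (h : names ≠ []) : searchA d names ≠ [] := by
  rw [searchA]
  split
  · exact h
  · split
    · exact h
    · split
      · exact h
      · dsimp only
        split
        · exact h
        · assumption

theorem searchA_leaf (d : PySem.Dict String (List String)) {path : List String}
    (hE : pvExt d path = []) : searchA d path = path := by
  rw [searchA]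
  split
  · rfl
  rename_i key hk
  split
  · rfl
  rename_i bucket hg
  split
  · rfl
  rename_i hb
  dsimp only
  have hall : ∀ n ∈ bucket, n ∈ path := by
    unfold pvExt pvBucketOf at hE
    rw [hk] at hE
    have hE2 : ((d.get? key).getD []).filter (fun n => decide (n ∉ path)) = [] := hE
    rw [hg] at hE2
    simp only [Option.getD_some, List.filter_eq_nil_iff, decide_eq_true_eq] at hE2
    intro n hn
    by_contra hc
    exact hE2 n hn hc
  have hfold : bucket.attach.foldl
      (fun acc t =>
        if _h2 : t.1 ∈ path then acc
        else
          let r := searchA d (path ++ [t.1])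
          if r.length > acc.length then r else acc) ([] : List String) = [] := by
    rw [PySem.List.foldl_congr_mem _ _ (fun acc _ => acc) _ ?hcg]
    · exact PySem.List.foldl_ignore _ _
    · intro acc t ht
      exact dif_pos (hall t.1 t.2)
  rw [hfold]
  simp

-- the core: the searchA fold over a node's bucket is the pvSel-fold over its children's results
theorem searchA_branch (d : PySem.Dict String (List String)) {path : List String}
    (hE : pvExt d path ≠ []) :
    searchA d path = ((pvExt d path).map (fun n => searchA d (path ++ [n]))).foldl pvSel [] := by
  have hBne : pvBucketOf d path ≠ [] := by
    intro hB
    exact hE (by simp [pvExt, hB])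
  rw [searchA]
  split
  · rename_i hk
    exact absurd (by unfold pvBucketOf; rw [hk]) hBne
  rename_i key hk
  split
  · rename_i hg
    exact absurd (show pvBucketOf d path = [] by
      unfold pvBucketOf; rw [hk]; show (d.get? key).getD [] = []; rw [hg]; rfl) hBne
  rename_i bucket hg
  have hBeq : pvBucketOf d path = bucket := by
    unfold pvBucketOf; rw [hk]; show (d.get? key).getD [] = bucket; rw [hg]; rfl
  have hb : bucket ≠ [] := by rw [← hBeq]; exact hBne
  rw [if_neg hb]
  dsimp only
  -- rewrite the attach-fold into a plain fold, then into a fold over the filter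
  have hstep1 : bucket.attach.foldl
      (fun acc t =>
    if _h2 : t.1 ∈ path then acc
    else
      let r := searchA d (path ++ [t.1])
      if r.length > acc.length then r else acc) ([] : List String)
      = bucket.foldl
    (fun acc n =>
      if n ∈ path then acc
      else pvSel acc (searchA d (path ++ [n]))) [] := by
    rw [PySem.List.foldl_congr_mem _ _
      (fun acc t => if t.1 ∈ path then acc else pvSel acc (searchA d (path ++ [t.1]))) _ ?hcg]
    · exact List.foldl_attach
        (f := fun acc n => if n ∈ path then acc else pvSel acc (searchA d (path ++ [n])))
        (l := bucket) (b := [])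
    · intro acc t ht
      by_cases hp : t.1 ∈ path
      · simp [hp]
      · simp [hp, pvSel]
  rw [hstep1]
  have hstep2 : bucket.foldl
      (fun acc n => if n ∈ path then acc else pvSel acc (searchA d (path ++ [n]))) ([] : List String)
      = (pvExt d path).foldl (fun acc n => pvSel acc (searchA d (path ++ [n]))) [] := by
    have hfun : (fun (acc : List String) n => if n ∈ path then acc else pvSel acc (searchA d (path ++ [n])))
    = (fun acc n => if n ∉ path then pvSel acc (searchA d (path ++ [n])) else acc) := by
      funext acc n
      by_cases hp : n ∈ path <;> simp [hp]
    rw [hfun, PySem.List.foldl_ite_eq_foldl_filter (fun n => n ∉ path)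
      (fun acc n => pvSel acc (searchA d (path ++ [n]))) bucket []]
    rw [pvExt, hBeq]
  rw [hstep2]
  have hstep3 : (pvExt d path).foldl (fun acc n => pvSel acc (searchA d (path ++ [n]))) ([] : List String)
      = ((pvExt d path).map (fun n => searchA d (path ++ [n]))).foldl pvSel [] := by
    rw [List.foldl_map]
  rw [hstep3]
  -- the fold is nonempty hence not [], so the `or` fallback is not taken
  obtain ⟨n0, ext', hcons⟩ := List.exists_cons_of_ne_nil hE
  have hne : ((pvExt d path).map (fun n => searchA d (path ++ [n]))).foldl pvSel [] ≠ [] := by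
    rw [hcons]
    simp only [List.map_cons, List.foldl_cons, pvSel_nil_left]
    intro hc
    have h1 : (searchA d (path ++ [n0])).length
    ≤ ((ext'.map (fun n => searchA d (path ++ [n]))).foldl pvSel (searchA d (path ++ [n0]))).length :=
      pv_foldl_sel_len _ _
    have h2 : searchA d (path ++ [n0]) ≠ [] := searchA_ne_nil d (by simp)
    rw [hc] at h1
    simp only [List.length_nil, Nat.le_zero, List.length_eq_zero_iff] at h1
    exact h2 h1
  rw [if_neg hne]

theorem loopB_eq (d : PySem.Dict String (List String)) (path : List String)
    (rest : List (List String)) (best : List String) :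
    loopB d (path :: rest) best = loopB d rest (pvSel best (searchA d path)) := by
  suffices H : ∀ k path, pvMu d path ≤ k → ∀ rest best,
      loopB d (path :: rest) best = loopB d rest (pvSel best (searchA d path)) from
    H (pvMu d path) path le_rfl rest best
  intro k
  induction k using Nat.strong_induction_on with
  | _ k IH =>
    intro path hle rest best
    by_cases hE : pvExt d path = []
    · rw [loopB, dif_pos hE, searchA_leaf d hE]
      rfl
    · rw [loopB, dif_neg hE]
      have hch : ∀ n ∈ pvExt d path, ∀ rest best,
          loopB d ((path ++ [n]) :: rest) best = loopB d rest (pvSel best (searchA d (path ++ [n]))) := by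
        intro n hn rest best
        have hlt := pv_ext_mu_lt d hn
        exact IH (pvMu d (path ++ [n])) (by omega) _ le_rfl rest best
      have hmap : ∀ (ns : List String), (∀ n ∈ ns, n ∈ pvExt d path) → ∀ rest best,
          loopB d (ns.map (fun n => path ++ [n]) ++ rest) best
            = loopB d rest (ns.foldl (fun b n => pvSel b (searchA d (path ++ [n]))) best) := by
        intro ns
        induction ns with
        | nil => intro _ rest best; simp
        | cons n ns ih =>
          intro hsub rest best
          simp only [List.map_cons, List.cons_append, List.foldl_cons]
          rw [hch n (hsub n List.mem_cons_self) _ best, ih (fun m hm => hsub m (List.mem_cons_of_mem _ hm))]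
      rw [hmap (pvExt d path) (fun n hn => hn) rest best]
      congr 1
      have : (pvExt d path).foldl (fun b n => pvSel b (searchA d (path ++ [n]))) best
          = ((pvExt d path).map (fun n => searchA d (path ++ [n]))).foldl pvSel best := by
        rw [List.foldl_map]
      rw [this, pv_foldl_sel_eq, searchA_branch d hE]

theorem pv_core_eq (d : PySem.Dict String (List String)) (s : String) :
    loopB d [[s]] [] = searchA d [s] := by
  rw [loopB_eq d [s] [] [], loopB, pvSel_nil_left]

-- ===== VERDICT (by name: the statement is the Claim_ definition above) =====
theorem ret_search_spec : Claim_equal_ret_search := by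
  intro start_name ebs _dom _pre
  unfold Spec_ret_search ret_search ret_search_alt
  simp only []
  rw [pv_core_eq]
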